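-- pv_equiv track=rewrite | github.com/aiwithqasim/PIAIC-Artificial-Intelligence | Q1/batch1/assignment/labs109.py | can_balance
-- ===== SOURCE A (Python) =====
-- def can_balance(items):
--     if len(items)==1:
--         return 0
--     for i in range(1,len(items)-2):
--         lans = 0
--         for j in range(i):
--             lans = lans + (i-j)*items[j]
--         rans = 0
--         for j in range(i+1,len(items)):
--             rans = rans + (j-i)*items[j]
--         if lans == rans:
--             return i
--     return -1
-- ===== SOURCE B (Python) =====
-- def can_balance(items):
--     # One pass: torque about pivot i balances iff i * sum(items) == sum(j*items[j]).
--     if len(items) == 1: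
--         return 0
--     total = 0
--     weighted = 0
--     for j, v in enumerate(items):
--         total += v
--         weighted += j * v
--     for i in range(1, len(items) - 2):
--         if i * total == weighted:
--             return i
--     return -1
-- ===== Notes on version B (the rewrite author's own statement) =====
-- stated objective: faster
-- what changed: Replaces the per-pivot inner loops recomputing left/right torques with a single pass computing total weight and total moment, then tests each pivot with the closed-form condition i*total == weighted.
import Mathlib
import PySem

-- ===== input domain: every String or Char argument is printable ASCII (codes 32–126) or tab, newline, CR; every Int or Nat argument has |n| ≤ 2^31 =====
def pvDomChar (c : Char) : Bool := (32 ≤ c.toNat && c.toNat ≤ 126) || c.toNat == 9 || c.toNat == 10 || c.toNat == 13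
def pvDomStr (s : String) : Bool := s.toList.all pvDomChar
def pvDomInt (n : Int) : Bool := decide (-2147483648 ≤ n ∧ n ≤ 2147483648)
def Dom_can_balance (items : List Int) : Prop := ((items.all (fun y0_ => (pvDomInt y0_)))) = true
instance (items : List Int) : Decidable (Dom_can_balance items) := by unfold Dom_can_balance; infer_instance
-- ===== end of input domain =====

-- B replaces A's per-pivot O(n) torque recomputation with one pass (total, weighted moment)
-- and the closed-form balance test i*total == weighted; objective: faster (asymptotic).

-- ===== PORT A =====
-- items[j] is always in range in these loops; pyGetD items j 0 is exact there.
def aLans (items : List Int) (i : Int) : Int :=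
  (PySem.List.pyRange 0 i 1).foldl (fun lans j => lans + (i - j) * PySem.List.pyGetD items j 0) 0

def aRans (items : List Int) (i : Int) : Int :=
  (PySem.List.pyRange (i + 1) (items.length : Int) 1).foldl
    (fun rans j => rans + (j - i) * PySem.List.pyGetD items j 0) 0

-- the 'for i in range(1, len(items)-2)' loop with its early return
def aLoop (items : List Int) : List Int → Int
  | [] => -1
  | i :: rest => if aLans items i == aRans items i then i else aLoop items rest

def can_balance (items : List Int) : Int :=
  if items.length == 1 then 0
  else aLoop items (PySem.List.pyRange 1 ((items.length : Int) - 2) 1)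

-- ===== PORT B =====
-- the single pass 'for j, v in enumerate(items): total += v; weighted += j*v'
def bSums (items : List Int) : Int × Int :=
  (PySem.List.enumerate items 0).foldl
    (fun acc p => (acc.1 + p.2, acc.2 + p.1 * p.2)) (0, 0)

-- the 'for i in range(1, len(items)-2)' loop with its early return
def bLoop (total weighted : Int) : List Int → Int
  | [] => -1
  | i :: rest => if i * total == weighted then i else bLoop total weighted rest

def can_balance_alt (items : List Int) : Int :=
  if items.length == 1 then 0
  else
    let tw := bSums items
    bLoop tw.1 tw.2 (PySem.List.pyRange 1 ((items.length : Int) - 2) 1)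

-- ===== PRECONDITION & SPEC =====
def Spec_can_balance (items : List Int) (out : Int) : Prop := out = can_balance_alt items
instance (items : List Int) (out : Int) : Decidable (Spec_can_balance items out) := by unfold Spec_can_balance; infer_instance

-- ===== CLAIM (what is proved, stated in full; the proofs are below) =====
def Claim_equal_can_balance : Prop := ∀ (items : List Int), Dom_can_balance items → Spec_can_balance items (can_balance items)

-- ===== LEMMAS AND PROOFS =====

-- Σ (j-i)*a(j) over a list = Σ j*a(j) - i * Σ a(j)
lemma sum_map_shift (a : Int → Int) (i : Int) (l : List Int) :
    (l.map (fun j => (j - i) * a j)).sum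
      = (l.map (fun j => j * a j)).sum - i * (l.map a).sum := by
  induction l with
  | nil => simp
  | cons x xs ih => simp [ih]; ring

lemma bSums_eq (items : List Int) :
    bSums items
      = (items.sum,
         ((PySem.List.pyRange 0 (items.length : Int) 1).map
            (fun j => j * PySem.List.pyGetD items j 0)).sum) := by
  unfold bSums
  rw [PySem.List.foldl_prod_mk (f := fun acc (p : Int × Int) => acc + p.2)
        (g := fun acc (p : Int × Int) => acc + p.1 * p.2)]
  rw [PySem.List.foldl_add (g := fun p : Int × Int => p.2),
      PySem.List.foldl_add (g := fun p : Int × Int => p.1 * p.2)]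
  rw [PySem.List.map_snd_enumerate]
  rw [PySem.List.enumerate_eq_map_pyRange (d := 0), List.map_map]
  simp only [PySem.List.len, zero_add]
  rfl

-- the balance condition: lans = rans ↔ i * total = weighted, for 0 ≤ i < n
lemma balance_iff (items : List Int) (i : Int) (h0 : 0 ≤ i) (h1 : i < (items.length : Int)) :
    (aLans items i = aRans items i) ↔
      (i * items.sum
        = ((PySem.List.pyRange 0 (items.length : Int) 1).map
            (fun j => j * PySem.List.pyGetD items j 0)).sum) := by
  set a : Int → Int := fun j => PySem.List.pyGetD items j 0 with ha
  set n : Int := (items.length : Int) with hn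
  have hL : aLans items i = -((PySem.List.pyRange 0 i 1).map (fun j => (j - i) * a j)).sum := by
    unfold aLans
    rw [PySem.List.foldl_add (g := fun j => (i - j) * a j)]
    have : ∀ l : List Int,
        (l.map (fun j => (i - j) * a j)).sum = -((l.map (fun j => (j - i) * a j)).sum) := by
      intro l; induction l with
      | nil => simp
      | cons x xs ih => simp [ih]; ring
    rw [this]; ring
  have hR : aRans items i = ((PySem.List.pyRange (i + 1) n 1).map (fun j => (j - i) * a j)).sum := by
    unfold aRans
    rw [PySem.List.foldl_add (g := fun j => (j - i) * a j)]
    ring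
  have hsplit : PySem.List.pyRange 0 n 1
      = PySem.List.pyRange 0 i 1 ++ (i :: PySem.List.pyRange (i + 1) n 1) := by
    rw [PySem.List.pyRange_one_append 0 i n h0 (le_of_lt h1),
        PySem.List.pyRange_one_cons h1]
  have hfull :
      ((PySem.List.pyRange 0 n 1).map (fun j => (j - i) * a j)).sum
        = ((PySem.List.pyRange 0 i 1).map (fun j => (j - i) * a j)).sum
          + ((PySem.List.pyRange (i + 1) n 1).map (fun j => (j - i) * a j)).sum := by
    rw [hsplit]; simp
  have htot : ((PySem.List.pyRange 0 n 1).map a).sum = items.sum := by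
    rw [hn, PySem.List.map_pyGetD_pyRange_zero']
  have hshift := sum_map_shift a i (PySem.List.pyRange 0 n 1)
  rw [htot] at hshift
  constructor
  · intro h
    rw [hL, hR] at h
    have : ((PySem.List.pyRange 0 n 1).map (fun j => (j - i) * a j)).sum = 0 := by
      rw [hfull]; linarith
    rw [hshift] at this; linarith
  · intro h
    have : ((PySem.List.pyRange 0 n 1).map (fun j => (j - i) * a j)).sum = 0 := by
      rw [hshift]; linarith
    rw [hfull] at this
    rw [hL, hR]; linarith

-- the two search loops agree on any list of in-range pivots
lemma loop_eq (items : List Int) (l : List Int)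
    (hl : ∀ i ∈ l, 0 ≤ i ∧ i < (items.length : Int)) :
    aLoop items l = bLoop (bSums items).1 (bSums items).2 l := by
  induction l with
  | nil => rfl
  | cons i rest ih =>
    have hi := hl i (List.mem_cons_self ..)
    have hiff := balance_iff items i hi.1 hi.2
    have h1 : (bSums items).1 = items.sum := by rw [bSums_eq]
    have h2 : (bSums items).2
        = ((PySem.List.pyRange 0 (items.length : Int) 1).map
            (fun j => j * PySem.List.pyGetD items j 0)).sum := by rw [bSums_eq]
    simp only [aLoop, bLoop, h1, h2]
    by_cases h : aLans items i = aRans items i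
    · rw [if_pos (by exact beq_iff_eq.mpr h), if_pos (by exact beq_iff_eq.mpr (hiff.mp h))]
    · have ih' := ih (fun j hj => hl j (List.mem_cons_of_mem _ hj))
      rw [h1, h2] at ih'
      rw [if_neg (by simpa using h),
          if_neg (by simp only [beq_iff_eq]; exact fun hc => h (hiff.mpr hc))]
      exact ih'

-- ===== VERDICT (by name: the statement is the Claim_ definition above) =====
theorem can_balance_spec : Claim_equal_can_balance := by
  intro items _
  unfold Spec_can_balance can_balance can_balance_alt
  by_cases h1 : items.length == 1
  · rw [if_pos h1, if_pos h1]
  · rw [if_neg h1, if_neg h1]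
    exact loop_eq items _ (fun i hi => by
      have := (PySem.List.mem_pyRange_one).mp hi
      constructor <;> omega)
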